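-- pv_equiv track=rewrite | github.com/rafalh/btcwidget | btcwidget/exchanges.py | _convert_period
-- ===== SOURCE A (Python) =====
-- def _convert_period(period_seconds):
--     # Available values: '1m', '5m', '15m', '30m', '1h', '3h', '6h', '12h', '1D', '7D', '14D', '1M'
--     m = 60
--     h = 60 * m
--     d = 24 * h
--     periods = [
--         (1 * m, '1m'),
--         (5 * m, '5m'),
--         (15 * m, '15m'),
--         (30 * m, '30m'),
--         (1 * h, '1h'),
--         (3 * h, '3h'),
--         (6 * h, '6h'),
--         (12 * h, '12h'),
--         (1 * d, '1D'),
--         (7 * d, '7D'),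
--         (14 * d, '14D'),
--         (None, '1M'),
--     ]
--     for sec, code in periods:
--         if not sec or sec >= period_seconds:
--             return code
-- ===== SOURCE B (Python) =====
-- _THRESHOLDS = [60, 300, 900, 1800, 3600, 10800, 21600, 43200, 86400, 604800, 1209600]
-- _CODES = ['1m', '5m', '15m', '30m', '1h', '3h', '6h', '12h', '1D', '7D', '14D', '1M']
--
--
-- def _convert_period(period_seconds):
--     # Binary search for the first threshold >= period_seconds (bisect_left);
--     # index == len(_THRESHOLDS) falls through to '1M'.
--     lo, hi = 0, len(_THRESHOLDS)
--     while lo < hi: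
--         mid = (lo + hi) // 2
--         if _THRESHOLDS[mid] < period_seconds:
--             lo = mid + 1
--         else:
--             hi = mid
--     return _CODES[lo]
-- ===== Notes on version B (the rewrite author's own statement) =====
-- stated objective: alternative
-- what changed: Replaces the linear first-match scan over (threshold, code) pairs by a hand-rolled bisect_left binary search over a precomputed sorted threshold table with a parallel code table.
import Mathlib
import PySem

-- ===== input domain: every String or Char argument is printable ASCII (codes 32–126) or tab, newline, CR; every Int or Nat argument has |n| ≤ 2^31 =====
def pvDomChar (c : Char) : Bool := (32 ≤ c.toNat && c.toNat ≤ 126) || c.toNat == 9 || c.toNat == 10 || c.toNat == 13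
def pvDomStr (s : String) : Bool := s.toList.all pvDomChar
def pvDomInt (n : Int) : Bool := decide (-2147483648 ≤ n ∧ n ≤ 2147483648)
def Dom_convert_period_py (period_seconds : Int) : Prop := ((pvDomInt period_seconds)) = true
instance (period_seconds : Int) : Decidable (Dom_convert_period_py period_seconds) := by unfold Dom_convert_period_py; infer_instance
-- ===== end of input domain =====

-- B replaces A's linear first-match scan by a bisect_left binary search over a
-- precomputed threshold table with a parallel code table (alternative, same result).

-- ===== PORT A =====
-- first-match loop over the (sec, code) list; 'not sec' is true for None (and would be for 0)
def convertLoopA (n : Int) : List (Option Int × String) → String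
  | [] => ""  -- Python's implicit 'return None'; unreachable: the list ends with (None, '1M')
  | (sec, code) :: rest =>
    match sec with
    | none => code
    | some s => if s = 0 ∨ s ≥ n then code else convertLoopA n rest

def convert_period_py (period_seconds : Int) : String :=
  let m : Int := 60
  let h : Int := 60 * m
  let d : Int := 24 * h
  let periods : List (Option Int × String) :=
    [(some (1 * m), "1m"), (some (5 * m), "5m"), (some (15 * m), "15m"),
     (some (30 * m), "30m"), (some (1 * h), "1h"), (some (3 * h), "3h"),
     (some (6 * h), "6h"), (some (12 * h), "12h"), (some (1 * d), "1D"),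
     (some (7 * d), "7D"), (some (14 * d), "14D"), (none, "1M")]
  convertLoopA period_seconds periods

-- ===== PORT B =====
def pvThresholds : Array Int := #[60, 300, 900, 1800, 3600, 10800, 21600, 43200, 86400, 604800, 1209600]
def pvCodes : Array String := #["1m", "5m", "15m", "30m", "1h", "3h", "6h", "12h", "1D", "7D", "14D", "1M"]

-- the hand-written bisect_left while-loop of Source B
def bisectLeftLoop (x : Int) (lo hi : Nat) : Nat :=
  if _h : lo < hi then
    let mid := (lo + hi) / 2
    if pvThresholds[mid]! < x then bisectLeftLoop x (mid + 1) hi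
    else bisectLeftLoop x lo mid
  else lo
termination_by hi - lo
decreasing_by all_goals omega

def convert_period_py_alt (period_seconds : Int) : String :=
  pvCodes[bisectLeftLoop period_seconds 0 pvThresholds.size]!

-- ===== PRECONDITION & SPEC =====
def Spec_convert_period_py (period_seconds : Int) (out : String) : Prop := out = convert_period_py_alt period_seconds
instance (period_seconds : Int) (out : String) : Decidable (Spec_convert_period_py period_seconds out) := by unfold Spec_convert_period_py; infer_instance

-- ===== CLAIM (what is proved, stated in full; the proofs are below) =====
def Claim_equal_convert_period_py : Prop := ∀ (period_seconds : Int), Dom_convert_period_py period_seconds → Spec_convert_period_py period_seconds (convert_period_py period_seconds)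

-- ===== LEMMAS AND PROOFS =====

lemma pvCase0 (n : Int) (hu : n ≤ 60) :
    convert_period_py n = convert_period_py_alt n := by
  have hA : convert_period_py n = "1m" := by
    simp only [convert_period_py]
    rw [convertLoopA, if_pos (by omega)]
  have hB : convert_period_py_alt n = "1m" := by
    simp only [convert_period_py_alt, pvThresholds, pvCodes]
    norm_num
    rw [bisectLeftLoop]
    norm_num [pvThresholds]
    rw [if_neg (by omega)]
    rw [bisectLeftLoop]
    norm_num [pvThresholds]
    rw [if_neg (by omega)]
    rw [bisectLeftLoop]
    norm_num [pvThresholds]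
    rw [if_neg (by omega)]
    rw [bisectLeftLoop]
    norm_num [pvThresholds]
    rw [if_neg (by omega)]
    rw [bisectLeftLoop]
    norm_num
  rw [hA, hB]

lemma pvCase1 (n : Int) (hl : 60 < n) (hu : n ≤ 300) :
    convert_period_py n = convert_period_py_alt n := by
  have hA : convert_period_py n = "5m" := by
    simp only [convert_period_py]
    rw [convertLoopA, if_neg (by omega)]
    rw [convertLoopA, if_pos (by omega)]
  have hB : convert_period_py_alt n = "5m" := by
    simp only [convert_period_py_alt, pvThresholds, pvCodes]
    norm_num
    rw [bisectLeftLoop]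
    norm_num [pvThresholds]
    rw [if_neg (by omega)]
    rw [bisectLeftLoop]
    norm_num [pvThresholds]
    rw [if_neg (by omega)]
    rw [bisectLeftLoop]
    norm_num [pvThresholds]
    rw [if_neg (by omega)]
    rw [bisectLeftLoop]
    norm_num [pvThresholds]
    rw [if_pos (by omega)]
    rw [bisectLeftLoop]
    norm_num
  rw [hA, hB]

lemma pvCase2 (n : Int) (hl : 300 < n) (hu : n ≤ 900) :
    convert_period_py n = convert_period_py_alt n := by
  have hA : convert_period_py n = "15m" := by
    simp only [convert_period_py]
    rw [convertLoopA, if_neg (by omega)]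
    rw [convertLoopA, if_neg (by omega)]
    rw [convertLoopA, if_pos (by omega)]
  have hB : convert_period_py_alt n = "15m" := by
    simp only [convert_period_py_alt, pvThresholds, pvCodes]
    norm_num
    rw [bisectLeftLoop]
    norm_num [pvThresholds]
    rw [if_neg (by omega)]
    rw [bisectLeftLoop]
    norm_num [pvThresholds]
    rw [if_neg (by omega)]
    rw [bisectLeftLoop]
    norm_num [pvThresholds]
    rw [if_pos (by omega)]
    rw [bisectLeftLoop]
    norm_num
  rw [hA, hB]

lemma pvCase3 (n : Int) (hl : 900 < n) (hu : n ≤ 1800) :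
    convert_period_py n = convert_period_py_alt n := by
  have hA : convert_period_py n = "30m" := by
    simp only [convert_period_py]
    rw [convertLoopA, if_neg (by omega)]
    rw [convertLoopA, if_neg (by omega)]
    rw [convertLoopA, if_neg (by omega)]
    rw [convertLoopA, if_pos (by omega)]
  have hB : convert_period_py_alt n = "30m" := by
    simp only [convert_period_py_alt, pvThresholds, pvCodes]
    norm_num
    rw [bisectLeftLoop]
    norm_num [pvThresholds]
    rw [if_neg (by omega)]
    rw [bisectLeftLoop]
    norm_num [pvThresholds]
    rw [if_pos (by omega)]
    rw [bisectLeftLoop]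
    norm_num [pvThresholds]
    rw [if_neg (by omega)]
    rw [bisectLeftLoop]
    norm_num [pvThresholds]
    rw [if_neg (by omega)]
    rw [bisectLeftLoop]
    norm_num
  rw [hA, hB]

lemma pvCase4 (n : Int) (hl : 1800 < n) (hu : n ≤ 3600) :
    convert_period_py n = convert_period_py_alt n := by
  have hA : convert_period_py n = "1h" := by
    simp only [convert_period_py]
    rw [convertLoopA, if_neg (by omega)]
    rw [convertLoopA, if_neg (by omega)]
    rw [convertLoopA, if_neg (by omega)]
    rw [convertLoopA, if_neg (by omega)]
    rw [convertLoopA, if_pos (by omega)]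
  have hB : convert_period_py_alt n = "1h" := by
    simp only [convert_period_py_alt, pvThresholds, pvCodes]
    norm_num
    rw [bisectLeftLoop]
    norm_num [pvThresholds]
    rw [if_neg (by omega)]
    rw [bisectLeftLoop]
    norm_num [pvThresholds]
    rw [if_pos (by omega)]
    rw [bisectLeftLoop]
    norm_num [pvThresholds]
    rw [if_neg (by omega)]
    rw [bisectLeftLoop]
    norm_num [pvThresholds]
    rw [if_pos (by omega)]
    rw [bisectLeftLoop]
    norm_num
  rw [hA, hB]

lemma pvCase5 (n : Int) (hl : 3600 < n) (hu : n ≤ 10800) :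
    convert_period_py n = convert_period_py_alt n := by
  have hA : convert_period_py n = "3h" := by
    simp only [convert_period_py]
    rw [convertLoopA, if_neg (by omega)]
    rw [convertLoopA, if_neg (by omega)]
    rw [convertLoopA, if_neg (by omega)]
    rw [convertLoopA, if_neg (by omega)]
    rw [convertLoopA, if_neg (by omega)]
    rw [convertLoopA, if_pos (by omega)]
  have hB : convert_period_py_alt n = "3h" := by
    simp only [convert_period_py_alt, pvThresholds, pvCodes]
    norm_num
    rw [bisectLeftLoop]
    norm_num [pvThresholds]
    rw [if_neg (by omega)]
    rw [bisectLeftLoop]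
    norm_num [pvThresholds]
    rw [if_pos (by omega)]
    rw [bisectLeftLoop]
    norm_num [pvThresholds]
    rw [if_pos (by omega)]
    rw [bisectLeftLoop]
    norm_num
  rw [hA, hB]

lemma pvCase6 (n : Int) (hl : 10800 < n) (hu : n ≤ 21600) :
    convert_period_py n = convert_period_py_alt n := by
  have hA : convert_period_py n = "6h" := by
    simp only [convert_period_py]
    rw [convertLoopA, if_neg (by omega)]
    rw [convertLoopA, if_neg (by omega)]
    rw [convertLoopA, if_neg (by omega)]
    rw [convertLoopA, if_neg (by omega)]
    rw [convertLoopA, if_neg (by omega)]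
    rw [convertLoopA, if_neg (by omega)]
    rw [convertLoopA, if_pos (by omega)]
  have hB : convert_period_py_alt n = "6h" := by
    simp only [convert_period_py_alt, pvThresholds, pvCodes]
    norm_num
    rw [bisectLeftLoop]
    norm_num [pvThresholds]
    rw [if_pos (by omega)]
    rw [bisectLeftLoop]
    norm_num [pvThresholds]
    rw [if_neg (by omega)]
    rw [bisectLeftLoop]
    norm_num [pvThresholds]
    rw [if_neg (by omega)]
    rw [bisectLeftLoop]
    norm_num [pvThresholds]
    rw [if_neg (by omega)]
    rw [bisectLeftLoop]
    norm_num
  rw [hA, hB]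

lemma pvCase7 (n : Int) (hl : 21600 < n) (hu : n ≤ 43200) :
    convert_period_py n = convert_period_py_alt n := by
  have hA : convert_period_py n = "12h" := by
    simp only [convert_period_py]
    rw [convertLoopA, if_neg (by omega)]
    rw [convertLoopA, if_neg (by omega)]
    rw [convertLoopA, if_neg (by omega)]
    rw [convertLoopA, if_neg (by omega)]
    rw [convertLoopA, if_neg (by omega)]
    rw [convertLoopA, if_neg (by omega)]
    rw [convertLoopA, if_neg (by omega)]
    rw [convertLoopA, if_pos (by omega)]
  have hB : convert_period_py_alt n = "12h" := by
    simp only [convert_period_py_alt, pvThresholds, pvCodes]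
    norm_num
    rw [bisectLeftLoop]
    norm_num [pvThresholds]
    rw [if_pos (by omega)]
    rw [bisectLeftLoop]
    norm_num [pvThresholds]
    rw [if_neg (by omega)]
    rw [bisectLeftLoop]
    norm_num [pvThresholds]
    rw [if_neg (by omega)]
    rw [bisectLeftLoop]
    norm_num [pvThresholds]
    rw [if_pos (by omega)]
    rw [bisectLeftLoop]
    norm_num
  rw [hA, hB]

lemma pvCase8 (n : Int) (hl : 43200 < n) (hu : n ≤ 86400) :
    convert_period_py n = convert_period_py_alt n := by
  have hA : convert_period_py n = "1D" := by
    simp only [convert_period_py]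
    rw [convertLoopA, if_neg (by omega)]
    rw [convertLoopA, if_neg (by omega)]
    rw [convertLoopA, if_neg (by omega)]
    rw [convertLoopA, if_neg (by omega)]
    rw [convertLoopA, if_neg (by omega)]
    rw [convertLoopA, if_neg (by omega)]
    rw [convertLoopA, if_neg (by omega)]
    rw [convertLoopA, if_neg (by omega)]
    rw [convertLoopA, if_pos (by omega)]
  have hB : convert_period_py_alt n = "1D" := by
    simp only [convert_period_py_alt, pvThresholds, pvCodes]
    norm_num
    rw [bisectLeftLoop]
    norm_num [pvThresholds]
    rw [if_pos (by omega)]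
    rw [bisectLeftLoop]
    norm_num [pvThresholds]
    rw [if_neg (by omega)]
    rw [bisectLeftLoop]
    norm_num [pvThresholds]
    rw [if_pos (by omega)]
    rw [bisectLeftLoop]
    norm_num
  rw [hA, hB]

lemma pvCase9 (n : Int) (hl : 86400 < n) (hu : n ≤ 604800) :
    convert_period_py n = convert_period_py_alt n := by
  have hA : convert_period_py n = "7D" := by
    simp only [convert_period_py]
    rw [convertLoopA, if_neg (by omega)]
    rw [convertLoopA, if_neg (by omega)]
    rw [convertLoopA, if_neg (by omega)]
    rw [convertLoopA, if_neg (by omega)]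
    rw [convertLoopA, if_neg (by omega)]
    rw [convertLoopA, if_neg (by omega)]
    rw [convertLoopA, if_neg (by omega)]
    rw [convertLoopA, if_neg (by omega)]
    rw [convertLoopA, if_neg (by omega)]
    rw [convertLoopA, if_pos (by omega)]
  have hB : convert_period_py_alt n = "7D" := by
    simp only [convert_period_py_alt, pvThresholds, pvCodes]
    norm_num
    rw [bisectLeftLoop]
    norm_num [pvThresholds]
    rw [if_pos (by omega)]
    rw [bisectLeftLoop]
    norm_num [pvThresholds]
    rw [if_pos (by omega)]
    rw [bisectLeftLoop]
    norm_num [pvThresholds]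
    rw [if_neg (by omega)]
    rw [bisectLeftLoop]
    norm_num [pvThresholds]
    rw [if_neg (by omega)]
    rw [bisectLeftLoop]
    norm_num
  rw [hA, hB]

lemma pvCase10 (n : Int) (hl : 604800 < n) (hu : n ≤ 1209600) :
    convert_period_py n = convert_period_py_alt n := by
  have hA : convert_period_py n = "14D" := by
    simp only [convert_period_py]
    rw [convertLoopA, if_neg (by omega)]
    rw [convertLoopA, if_neg (by omega)]
    rw [convertLoopA, if_neg (by omega)]
    rw [convertLoopA, if_neg (by omega)]
    rw [convertLoopA, if_neg (by omega)]
    rw [convertLoopA, if_neg (by omega)]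
    rw [convertLoopA, if_neg (by omega)]
    rw [convertLoopA, if_neg (by omega)]
    rw [convertLoopA, if_neg (by omega)]
    rw [convertLoopA, if_neg (by omega)]
    rw [convertLoopA, if_pos (by omega)]
  have hB : convert_period_py_alt n = "14D" := by
    simp only [convert_period_py_alt, pvThresholds, pvCodes]
    norm_num
    rw [bisectLeftLoop]
    norm_num [pvThresholds]
    rw [if_pos (by omega)]
    rw [bisectLeftLoop]
    norm_num [pvThresholds]
    rw [if_pos (by omega)]
    rw [bisectLeftLoop]
    norm_num [pvThresholds]
    rw [if_neg (by omega)]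
    rw [bisectLeftLoop]
    norm_num [pvThresholds]
    rw [if_pos (by omega)]
    rw [bisectLeftLoop]
    norm_num
  rw [hA, hB]

lemma pvCase11 (n : Int) (hl : 1209600 < n) :
    convert_period_py n = convert_period_py_alt n := by
  have hA : convert_period_py n = "1M" := by
    simp only [convert_period_py]
    rw [convertLoopA, if_neg (by omega)]
    rw [convertLoopA, if_neg (by omega)]
    rw [convertLoopA, if_neg (by omega)]
    rw [convertLoopA, if_neg (by omega)]
    rw [convertLoopA, if_neg (by omega)]
    rw [convertLoopA, if_neg (by omega)]
    rw [convertLoopA, if_neg (by omega)]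
    rw [convertLoopA, if_neg (by omega)]
    rw [convertLoopA, if_neg (by omega)]
    rw [convertLoopA, if_neg (by omega)]
    rw [convertLoopA, if_neg (by omega)]
    rw [convertLoopA]
  have hB : convert_period_py_alt n = "1M" := by
    simp only [convert_period_py_alt, pvThresholds, pvCodes]
    norm_num
    rw [bisectLeftLoop]
    norm_num [pvThresholds]
    rw [if_pos (by omega)]
    rw [bisectLeftLoop]
    norm_num [pvThresholds]
    rw [if_pos (by omega)]
    rw [bisectLeftLoop]
    norm_num [pvThresholds]
    rw [if_pos (by omega)]
    rw [bisectLeftLoop]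
    norm_num
  rw [hA, hB]

-- ===== VERDICT (by name: the statement is the Claim_ definition above) =====
theorem convert_period_py_spec : Claim_equal_convert_period_py := by
  intro n _
  show convert_period_py n = convert_period_py_alt n
  by_cases h0 : n ≤ 60
  · exact pvCase0 n h0
  by_cases h1 : n ≤ 300
  · exact pvCase1 n (by omega) h1
  by_cases h2 : n ≤ 900
  · exact pvCase2 n (by omega) h2
  by_cases h3 : n ≤ 1800
  · exact pvCase3 n (by omega) h3
  by_cases h4 : n ≤ 3600
  · exact pvCase4 n (by omega) h4
  by_cases h5 : n ≤ 10800
  · exact pvCase5 n (by omega) h5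
  by_cases h6 : n ≤ 21600
  · exact pvCase6 n (by omega) h6
  by_cases h7 : n ≤ 43200
  · exact pvCase7 n (by omega) h7
  by_cases h8 : n ≤ 86400
  · exact pvCase8 n (by omega) h8
  by_cases h9 : n ≤ 604800
  · exact pvCase9 n (by omega) h9
  by_cases h10 : n ≤ 1209600
  · exact pvCase10 n (by omega) h10
  · exact pvCase11 n (by omega)
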